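-- pv_equiv track=rewrite | github.com/teqdeq/Shramko-GoPro13-Control-App-for-multicamera-4dgs-3dgs-rigs | read_and_write_all_settings_from_prime_to_other_v02.py | group_settings_by_priority
-- ===== SOURCE A (Python) =====
-- SETTING_PRIORITIES = {
--     'system': [
--         '173',  # Performance Mode - должен быть первым
--         '126',  # System Mode - вторым
--         '128'   # Media Format - третьим
--     ],
--     'core': [
--         '2',    # Resolution
--         '3',    # FPS
--         '91'    # Lens
--     ],
--     'features': [
--         '135',  # HyperSmooth
--         '64',   # Bitrate
--         '115'   # Color
--     ],
--     'optional': []  # Добавляем группу для опциональных настроек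
-- }
--
-- def group_settings_by_priority(settings):
--     """Группировка настроек по приоритетам"""
--     grouped = {
--         'system': {},
--         'core': {},
--         'features': {},
--         'optional': {}  # Добавляем группу optional
--     }
--
--     for setting_id, value in settings.items():
--         if setting_id in SETTING_PRIORITIES['system']:
--             grouped['system'][setting_id] = value
--         elif setting_id in SETTING_PRIORITIES['core']:
--             grouped['core'][setting_id] = value
--         elif setting_id in SETTING_PRIORITIES['features']:
--             grouped['features'][setting_id] = value
--         else:
--             grouped['optional'][setting_id] = value  # Все остальные настройки идут в optional
--
--     return grouped
-- ===== SOURCE B (Python) =====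
-- SETTING_PRIORITIES = {
--     'system': ['173', '126', '128'],
--     'core': ['2', '3', '91'],
--     'features': ['135', '64', '115'],
--     'optional': []
-- }
--
-- def group_settings_by_priority(settings):
--     """Группировка настроек по приоритетам: one filtering pass per group
--     (the three priority lists are pairwise disjoint, so per-group filters
--     give the same buckets as a first-match chain)."""
--     known = set(SETTING_PRIORITIES['system'] + SETTING_PRIORITIES['core']
--                 + SETTING_PRIORITIES['features'])
--     return {
--         'system': {k: v for k, v in settings.items()
--                    if k in SETTING_PRIORITIES['system']},
--         'core': {k: v for k, v in settings.items()
--                  if k in SETTING_PRIORITIES['core']},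
--         'features': {k: v for k, v in settings.items()
--                      if k in SETTING_PRIORITIES['features']},
--         'optional': {k: v for k, v in settings.items() if k not in known},
--     }
-- ===== Notes on version B (the rewrite author's own statement) =====
-- stated objective: alternative
-- what changed: Replaced A's single bucketing loop with a four-way if/elif membership chain by four independent filtering passes (one dict comprehension per group, plus a precomputed union set for 'optional'), correct because the priority lists are pairwise disjoint.
import Mathlib
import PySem

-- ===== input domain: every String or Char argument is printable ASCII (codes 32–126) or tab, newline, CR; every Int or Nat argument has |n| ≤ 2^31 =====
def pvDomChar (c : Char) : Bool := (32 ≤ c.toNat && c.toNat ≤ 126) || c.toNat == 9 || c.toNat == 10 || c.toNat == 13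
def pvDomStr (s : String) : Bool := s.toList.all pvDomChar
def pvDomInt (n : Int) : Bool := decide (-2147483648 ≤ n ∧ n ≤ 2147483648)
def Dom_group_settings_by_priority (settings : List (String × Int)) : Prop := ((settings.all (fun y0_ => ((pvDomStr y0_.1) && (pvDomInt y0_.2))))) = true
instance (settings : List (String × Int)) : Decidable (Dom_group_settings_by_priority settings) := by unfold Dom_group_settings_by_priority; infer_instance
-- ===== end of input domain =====

-- B replaces A's single bucketing loop (four-way if/elif chain) by four independent filtering passes, one per group (the priority lists are pairwise disjoint); same result, similar cost.


-- ===== PORT A =====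
def SETTING_PRIORITIES : PySem.Dict String (List String) :=
  PySem.Dict.ofList [("system", ["173", "126", "128"]),
                     ("core", ["2", "3", "91"]),
                     ("features", ["135", "64", "115"]),
                     ("optional", [])]

-- loop body of A: the if/elif membership chain, mutating the grouped dict of dicts
def pvStepA (g : PySem.Dict String (PySem.Dict String Int)) (p : String × Int) :
    PySem.Dict String (PySem.Dict String Int) :=
  if (SETTING_PRIORITIES.getD "system" []).contains p.1 then
    g.modify "system" PySem.Dict.empty (fun d => d.insert p.1 p.2)
  else if (SETTING_PRIORITIES.getD "core" []).contains p.1 then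
    g.modify "core" PySem.Dict.empty (fun d => d.insert p.1 p.2)
  else if (SETTING_PRIORITIES.getD "features" []).contains p.1 then
    g.modify "features" PySem.Dict.empty (fun d => d.insert p.1 p.2)
  else
    g.modify "optional" PySem.Dict.empty (fun d => d.insert p.1 p.2)

def group_settings_by_priority (settings : List (String × Int)) : List (String × List (String × Int)) :=
  let grouped : PySem.Dict String (PySem.Dict String Int) :=
    PySem.Dict.ofList [("system", PySem.Dict.empty), ("core", PySem.Dict.empty),
                       ("features", PySem.Dict.empty), ("optional", PySem.Dict.empty)]
  let grouped := settings.foldl pvStepA grouped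
  grouped.items.map (fun p => (p.1, p.2.items))

-- ===== PORT B =====
-- B: no accumulator loop; one dict comprehension (filter) per group, 'optional' via the union set
def group_settings_by_priority_alt (settings : List (String × Int)) : List (String × List (String × Int)) :=
  let sys := SETTING_PRIORITIES.getD "system" []
  let core := SETTING_PRIORITIES.getD "core" []
  let feat := SETTING_PRIORITIES.getD "features" []
  let known : PySem.Set String := PySem.Set.ofList (sys ++ core ++ feat)
  [("system",   (PySem.Dict.ofList (settings.filter (fun p => sys.contains p.1))).items),
   ("core",     (PySem.Dict.ofList (settings.filter (fun p => core.contains p.1))).items),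
   ("features", (PySem.Dict.ofList (settings.filter (fun p => feat.contains p.1))).items),
   ("optional", (PySem.Dict.ofList (settings.filter (fun p => !(PySem.Set.contains known p.1)))).items)]

-- ===== PRECONDITION & SPEC =====
def Spec_group_settings_by_priority (settings : List (String × Int)) (out : List (String × List (String × Int))) : Prop := out = group_settings_by_priority_alt settings
instance (settings : List (String × Int)) (out : List (String × List (String × Int))) : Decidable (Spec_group_settings_by_priority settings out) := by unfold Spec_group_settings_by_priority; infer_instance

-- ===== CLAIM (what is proved, stated in full; the proofs are below) =====
def Claim_equal_group_settings_by_priority : Prop := ∀ (settings : List (String × Int)), Dom_group_settings_by_priority settings → Spec_group_settings_by_priority settings (group_settings_by_priority settings)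

-- ===== LEMMAS AND PROOFS =====

-- disjointness facts, per branch of A's chain, for a KNOWN member of one priority list
theorem pvSysFacts (s : String) (h : s = "173" ∨ s = "126" ∨ s = "128") :
    (["2", "3", "91"] : List String).contains s = false ∧
    (["135", "64", "115"] : List String).contains s = false ∧
    List.contains (PySem.Set.ofList (["173", "126", "128"] ++ ["2", "3", "91"] ++ ["135", "64", "115"])) s = true := by
  rcases h with rfl | rfl | rfl <;> exact ⟨by decide, by decide, by decide⟩

theorem pvCoreFacts (s : String) (h : s = "2" ∨ s = "3" ∨ s = "91") :
    (["135", "64", "115"] : List String).contains s = false ∧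
    List.contains (PySem.Set.ofList (["173", "126", "128"] ++ ["2", "3", "91"] ++ ["135", "64", "115"])) s = true := by
  rcases h with rfl | rfl | rfl <;> exact ⟨by decide, by decide⟩

theorem pvFeatFacts (s : String) (h : s = "135" ∨ s = "64" ∨ s = "115") :
    List.contains (PySem.Set.ofList (["173", "126", "128"] ++ ["2", "3", "91"] ++ ["135", "64", "115"])) s = true := by
  rcases h with rfl | rfl | rfl <;> decide

-- A's fold over the four-bucket dict is the four filtered folds, one per bucket
theorem pvFoldA (settings : List (String × Int)) :
    ∀ (ds dc df dopt : PySem.Dict String Int),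
    settings.foldl pvStepA
      (PySem.Dict.mk [("system", ds), ("core", dc), ("features", df), ("optional", dopt)]) =
    PySem.Dict.mk
      [("system", (settings.filter (fun p => (["173", "126", "128"] : List String).contains p.1)).foldl
          (fun d p => d.insert p.1 p.2) ds),
       ("core", (settings.filter (fun p => (["2", "3", "91"] : List String).contains p.1)).foldl
          (fun d p => d.insert p.1 p.2) dc),
       ("features", (settings.filter (fun p => (["135", "64", "115"] : List String).contains p.1)).foldl
          (fun d p => d.insert p.1 p.2) df),
       ("optional", (settings.filter (fun p =>
            !(List.contains (PySem.Set.ofList (["173", "126", "128"] ++ ["2", "3", "91"] ++ ["135", "64", "115"])) p.1))).foldl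
          (fun d p => d.insert p.1 p.2) dopt)] := by
  induction settings with
  | nil => intro ds dc df dopt; rfl
  | cons p rest ih =>
    intro ds dc df dopt
    by_cases h1 : (["173", "126", "128"] : List String).contains p.1 = true
    · obtain ⟨hc, hf, hk⟩ := pvSysFacts p.1 (by simpa using h1)
      simp only [List.foldl_cons, List.filter_cons, pvStepA, h1, hc, hf, hk,
        show SETTING_PRIORITIES.getD "system" [] = ["173", "126", "128"] from rfl,
        Bool.not_true, Bool.false_eq_true, ite_false, ite_true]
      rw [show (PySem.Dict.mk [("system", ds), ("core", dc), ("features", df), ("optional", dopt)]).modify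
            "system" PySem.Dict.empty (fun d => d.insert p.1 p.2) =
          PySem.Dict.mk [("system", ds.insert p.1 p.2), ("core", dc), ("features", df), ("optional", dopt)] from rfl]
      exact ih _ _ _ _
    · by_cases h2 : (["2", "3", "91"] : List String).contains p.1 = true
      · obtain ⟨hf, hk⟩ := pvCoreFacts p.1 (by simpa using h2)
        simp only [List.foldl_cons, List.filter_cons, pvStepA, h1, h2, hf, hk,
          show SETTING_PRIORITIES.getD "system" [] = ["173", "126", "128"] from rfl,
          show SETTING_PRIORITIES.getD "core" [] = ["2", "3", "91"] from rfl,
          Bool.not_true, Bool.false_eq_true, ite_false, ite_true]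
        rw [show (PySem.Dict.mk [("system", ds), ("core", dc), ("features", df), ("optional", dopt)]).modify
              "core" PySem.Dict.empty (fun d => d.insert p.1 p.2) =
            PySem.Dict.mk [("system", ds), ("core", dc.insert p.1 p.2), ("features", df), ("optional", dopt)] from rfl]
        exact ih _ _ _ _
      · by_cases h3 : (["135", "64", "115"] : List String).contains p.1 = true
        · have hk := pvFeatFacts p.1 (by simpa using h3)
          simp only [List.foldl_cons, List.filter_cons, pvStepA, h1, h2, h3, hk,
            show SETTING_PRIORITIES.getD "system" [] = ["173", "126", "128"] from rfl,
            show SETTING_PRIORITIES.getD "core" [] = ["2", "3", "91"] from rfl,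
            show SETTING_PRIORITIES.getD "features" [] = ["135", "64", "115"] from rfl,
            Bool.not_true, Bool.false_eq_true, ite_false, ite_true]
          rw [show (PySem.Dict.mk [("system", ds), ("core", dc), ("features", df), ("optional", dopt)]).modify
                "features" PySem.Dict.empty (fun d => d.insert p.1 p.2) =
              PySem.Dict.mk [("system", ds), ("core", dc), ("features", df.insert p.1 p.2), ("optional", dopt)] from rfl]
          exact ih _ _ _ _
        · have hk : List.contains (PySem.Set.ofList (["173", "126", "128"] ++ ["2", "3", "91"] ++ ["135", "64", "115"])) p.1 = false := by
            rw [show (PySem.Set.ofList (["173", "126", "128"] ++ ["2", "3", "91"] ++ ["135", "64", "115"]) : List String) =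
              ["173", "126", "128", "2", "3", "91", "135", "64", "115"] from rfl]
            simp only [List.contains_cons, List.contains_nil] at h1 h2 h3 ⊢
            simp only [Bool.or_eq_true, beq_iff_eq] at h1 h2 h3 ⊢
            simp_all
          simp only [List.foldl_cons, List.filter_cons, pvStepA, h1, h2, h3, hk,
            show SETTING_PRIORITIES.getD "system" [] = ["173", "126", "128"] from rfl,
            show SETTING_PRIORITIES.getD "core" [] = ["2", "3", "91"] from rfl,
            show SETTING_PRIORITIES.getD "features" [] = ["135", "64", "115"] from rfl,
            Bool.not_false, Bool.false_eq_true, ite_false, ite_true]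
          rw [show (PySem.Dict.mk [("system", ds), ("core", dc), ("features", df), ("optional", dopt)]).modify
                "optional" PySem.Dict.empty (fun d => d.insert p.1 p.2) =
              PySem.Dict.mk [("system", ds), ("core", dc), ("features", df), ("optional", dopt.insert p.1 p.2)] from rfl]
          exact ih _ _ _ _

-- ===== VERDICT (by name: the statement is the Claim_ definition above) =====
theorem group_settings_by_priority_spec : Claim_equal_group_settings_by_priority := by
  intro settings _
  unfold Spec_group_settings_by_priority group_settings_by_priority group_settings_by_priority_alt
  dsimp only
  rw [show (PySem.Dict.ofList [("system", (PySem.Dict.empty : PySem.Dict String Int)), ("core", PySem.Dict.empty),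
        ("features", PySem.Dict.empty), ("optional", PySem.Dict.empty)]) =
      PySem.Dict.mk [("system", PySem.Dict.empty), ("core", PySem.Dict.empty),
        ("features", PySem.Dict.empty), ("optional", PySem.Dict.empty)] from rfl]
  rw [pvFoldA]
  rfl
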